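-- pv_equiv track=rewrite | github.com/Modeling-Coding-Automation-Project/MCAP_Playground | helper/SIL/SIL_operator.py | check_path_is_sample
-- ===== SOURCE A (Python) =====
-- def check_path_is_sample(path: str) -> str:
--     """
--     Check if the given path is under "external_libraries" and contains
--     "sample", "test_sil", or "test_vs" folders. If so, return an empty string.
--     Otherwise, return the original path.
--     """
--
--     path_folders = path.split('/')
--     external_libraries_flag = False
--     helper_file_flag = False
--
--     for i, folder in enumerate(path_folders):
--         if folder.lower() == "external_libraries":
--             external_libraries_flag = True
--
--         if (external_libraries_flag) and \
--             ((folder.lower() == "sample") or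
--              (folder.lower() == "test_sil") or
--                 (folder.lower() == "test_vs")):
--             helper_file_flag = True
--
--     if external_libraries_flag and helper_file_flag:
--         return ""
--     else:
--         return path
-- ===== SOURCE B (Python) =====
-- _SPECIAL = ("sample", "test_sil", "test_vs")
--
-- def check_path_is_sample(path: str) -> str:
--     """Brute-force pair search: return "" iff some folder pair (i, j) with
--     i <= j has folders[i] == "external_libraries" and folders[j] special."""
--     folders = [f.lower() for f in path.split('/')]
--     pair_found = any(
--         anchor == "external_libraries" and special in _SPECIAL
--         for k, anchor in enumerate(folders)
--         for special in folders[k:]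
--     )
--     return "" if pair_found else path
-- ===== Notes on version B (the rewrite author's own statement) =====
-- stated objective: alternative
-- what changed: Replaced A's single forward pass threading two boolean flags with a declarative brute-force pair search: lowercase the folders once, then test every (anchor index k, folder in the suffix from k) pair for the external_libraries/special combination.
import Mathlib
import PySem

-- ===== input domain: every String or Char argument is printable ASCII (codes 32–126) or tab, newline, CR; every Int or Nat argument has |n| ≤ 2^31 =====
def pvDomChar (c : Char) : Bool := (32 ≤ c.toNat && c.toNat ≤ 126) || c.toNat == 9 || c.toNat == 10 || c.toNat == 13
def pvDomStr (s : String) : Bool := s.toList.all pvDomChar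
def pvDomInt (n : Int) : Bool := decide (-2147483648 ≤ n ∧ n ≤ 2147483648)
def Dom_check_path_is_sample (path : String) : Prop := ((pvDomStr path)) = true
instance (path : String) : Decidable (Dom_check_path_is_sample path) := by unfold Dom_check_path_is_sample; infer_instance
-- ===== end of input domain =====

-- B replaces A's single forward pass threading two boolean flags by a declarative
-- brute-force pair search over (anchor index, folder in the suffix): alternative, not faster.

-- ===== PORT A =====
-- A's loop body: state = (external_libraries_flag, helper_file_flag)
def pvStepA (fl : Bool × Bool) (folder : String) : Bool × Bool :=
  let ext := if PySem.Str.lower folder == "external_libraries" then true else fl.1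
  let hf := if ext && ((PySem.Str.lower folder == "sample") ||
                       (PySem.Str.lower folder == "test_sil") ||
                       (PySem.Str.lower folder == "test_vs")) then true else fl.2
  (ext, hf)

def check_path_is_sample (path : String) : String :=
  let path_folders := ((PySem.Str.split? path "/").getD [])
  let st := path_folders.foldl pvStepA (false, false)
  if st.1 && st.2 then "" else path

-- ===== PORT B =====
-- 'special in _SPECIAL' for the tuple _SPECIAL = ("sample", "test_sil", "test_vs")
def pvInSpecial (f : String) : Bool :=
  f == "sample" || f == "test_sil" || f == "test_vs"

def check_path_is_sample_alt (path : String) : String :=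
  let folders := (((PySem.Str.split? path "/").getD [])).map PySem.Str.lower
  -- the nested generator: 'for k, anchor in enumerate(folders) for special in folders[k:]'
  let pair_found := (PySem.List.enumerate folders 0).any
    (fun p => (PySem.List.slice folders (some p.1) none).any
      (fun special => p.2 == "external_libraries" && pvInSpecial special))
  if pair_found then "" else path

-- ===== PRECONDITION & SPEC =====
def Spec_check_path_is_sample (path : String) (out : String) : Prop := out = check_path_is_sample_alt path
instance (path : String) (out : String) : Decidable (Spec_check_path_is_sample path out) := by unfold Spec_check_path_is_sample; infer_instance

-- ===== CLAIM (what is proved, stated in full; the proofs are below) =====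
def Claim_equal_check_path_is_sample : Prop := ∀ (path : String), Dom_check_path_is_sample path → Spec_check_path_is_sample path (check_path_is_sample path)

-- ===== LEMMAS AND PROOFS =====

-- the common characterisation: first 'external_libraries', then any special in its suffix
def pvQ : List String → Bool
  | [] => false
  | x :: t => if x == "external_libraries" then t.any pvInSpecial else pvQ t

-- once the external_libraries flag is set, A's loop only accumulates 'special' hits
theorem pvFoldA_true (L : List String) (h : Bool) :
    L.foldl pvStepA (true, h) = (true, h || L.any (fun f => pvInSpecial (PySem.Str.lower f))) := by
  induction L generalizing h with
  | nil => simp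
  | cons x L ih =>
    simp only [List.foldl_cons, List.any_cons]
    have hx : pvStepA (true, h) x = (true, h || pvInSpecial (PySem.Str.lower x)) := by
      simp [pvStepA, pvInSpecial]
      by_cases h1 : PySem.Str.lower x = "sample" <;>
        by_cases h2 : PySem.Str.lower x = "test_sil" <;>
          by_cases h3 : PySem.Str.lower x = "test_vs" <;> simp [h1, h2, h3]
    rw [hx, ih]
    simp [Bool.or_assoc]

-- A's final condition equals pvQ of the lowered folder list
theorem pvFoldA_Q (L : List String) :
    ((L.foldl pvStepA (false, false)).1 && (L.foldl pvStepA (false, false)).2)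
    = pvQ (L.map PySem.Str.lower) := by
  induction L with
  | nil => simp [pvQ]
  | cons x L ih =>
    by_cases hx : PySem.Str.lower x = "external_libraries"
    · have hstep : pvStepA (false, false) x = (true, false) := by
        simp [pvStepA, hx]
      simp only [List.foldl_cons, hstep, pvFoldA_true, List.map_cons, pvQ, hx]
      simp [List.any_map, Function.comp_def]
    · have hstep : pvStepA (false, false) x = (false, false) := by
        simp [pvStepA, hx]
      simp only [List.foldl_cons, hstep, List.map_cons, pvQ]
      simpa [hx] using ih

-- B's pair search over one fixed list l, started at index s
def pvPair (l : List String) : List String → Int → Bool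
  | [], _ => false
  | x :: t, s =>
      ((PySem.List.slice l (some s) none).any
        (fun special => x == "external_libraries" && pvInSpecial special))
      || pvPair l t (s + 1)

theorem pvPair_eq_any (l L : List String) (s : Int) :
    (PySem.List.enumerate L s).any
      (fun p => (PySem.List.slice l (some p.1) none).any
        (fun special => p.2 == "external_libraries" && pvInSpecial special))
    = pvPair l L s := by
  induction L generalizing s with
  | nil => simp [pvPair, PySem.List.enumerate_nil]
  | cons x t ih => simp [pvPair, PySem.List.enumerate_cons, ih]

-- pvQ true implies a special element exists
theorem pvQ_any (t : List String) : pvQ t = true → t.any pvInSpecial = true := by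
  induction t with
  | nil => simp [pvQ]
  | cons x t ih =>
    simp only [pvQ, List.any_cons]
    by_cases hx : (x == "external_libraries") = true
    · rw [if_pos hx]; intro h; simp [h]
    · rw [if_neg hx]; intro h; simp [ih h]

-- the pair search over the suffix of l starting at j equals pvQ of that suffix
theorem pvPair_eq_Q (l : List String) (j : Nat) (L : List String) (hL : l.drop j = L) :
    pvPair l L (j : Int) = pvQ L := by
  induction L generalizing j with
  | nil => simp [pvPair, pvQ]
  | cons x t ih =>
    have hdropj : PySem.List.slice l (some (j : Int)) none = x :: t := by
      rw [PySem.List.slice_from_natCast, hL]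
    have hdropj1 : l.drop (j + 1) = t := by
      have h1 := congrArg (List.drop 1) hL
      rw [List.drop_drop] at h1
      simpa using h1
    have hih := ih (j + 1) hdropj1
    have hcast : ((j : Int) + 1) = ((j + 1 : Nat) : Int) := by push_cast; ring
    simp only [pvPair, pvQ, hdropj, hcast, hih]
    by_cases hx : x = "external_libraries"
    · subst hx
      have hns : pvInSpecial "external_libraries" = false := by decide
      simp only [beq_self_eq_true, if_true, Bool.true_and, List.any_cons, hns, Bool.false_or]
      cases hq : pvQ t
      · simp
      · simp [pvQ_any t hq]
    · have hx' : (x == "external_libraries") = false := by simpa using hx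
      simp [hx']

-- ===== VERDICT (by name: the statement is the Claim_ definition above) =====
theorem check_path_is_sample_spec : Claim_equal_check_path_is_sample := by
  intro path _
  unfold Spec_check_path_is_sample check_path_is_sample check_path_is_sample_alt
  have hA := pvFoldA_Q (((PySem.Str.split? path "/").getD []))
  have hB := pvPair_eq_any ((((PySem.Str.split? path "/").getD [])).map PySem.Str.lower)
      ((((PySem.Str.split? path "/").getD [])).map PySem.Str.lower) 0
  have hQ := pvPair_eq_Q ((((PySem.Str.split? path "/").getD [])).map PySem.Str.lower) 0
      ((((PySem.Str.split? path "/").getD [])).map PySem.Str.lower) (by simp)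
  simp only [Nat.cast_zero] at hQ
  simp only [hA, hB, hQ]
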